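-- pv_equiv track=rewrite | github.com/Dies-Irae-mu/game | world/wod20th/utils/vampire_utils.py | calculate_discipline_cost
-- ===== SOURCE A (Python) =====
-- def calculate_discipline_cost(current_rating: int, new_rating: int, is_in_clan: bool) -> int:
--     """
--     Calculate XP cost for disciplines.
--     Cost is 10 XP then Current Rating x 5 XP (in-clan) or x 7 XP (out-of-clan).
--
--     Args:
--         current_rating: Current rating of the discipline
--         new_rating: Desired new rating
--         is_in_clan: Whether the discipline is in-clan
--
--     Returns:
--         int: Total XP cost
--     """
--     total_cost = 0
--     for rating in range(current_rating + 1, new_rating + 1):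
--         if rating == 1:
--             total_cost += 10  # First dot always costs 10
--         else:
--             if is_in_clan:
--                 total_cost += (rating - 1) * 5  # Previous rating × 5
--             else:
--                 total_cost += (rating - 1) * 7  # Previous rating × 7
--     return total_cost
-- ===== SOURCE B (Python) =====
-- def calculate_discipline_cost(current_rating: int, new_rating: int, is_in_clan: bool) -> int:
--     """Closed-form: arithmetic-series sum of previous-rating multiples, +10 if the first dot is in range."""
--     if new_rating <= current_rating:
--         return 0
--     mult = 5 if is_in_clan else 7
--     # sum of (r-1) for r in (current_rating, new_rating]
--     series = (new_rating - current_rating) * (current_rating + new_rating - 1) // 2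
--     first_dot = 10 if current_rating < 1 <= new_rating else 0
--     return series * mult + first_dot
-- ===== Notes on version B (the rewrite author's own statement) =====
-- stated objective: alternative
-- what changed: Replaces the per-dot loop by a closed-form arithmetic-series formula (plus a +10 term when the range covers the first dot).
import Mathlib
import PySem

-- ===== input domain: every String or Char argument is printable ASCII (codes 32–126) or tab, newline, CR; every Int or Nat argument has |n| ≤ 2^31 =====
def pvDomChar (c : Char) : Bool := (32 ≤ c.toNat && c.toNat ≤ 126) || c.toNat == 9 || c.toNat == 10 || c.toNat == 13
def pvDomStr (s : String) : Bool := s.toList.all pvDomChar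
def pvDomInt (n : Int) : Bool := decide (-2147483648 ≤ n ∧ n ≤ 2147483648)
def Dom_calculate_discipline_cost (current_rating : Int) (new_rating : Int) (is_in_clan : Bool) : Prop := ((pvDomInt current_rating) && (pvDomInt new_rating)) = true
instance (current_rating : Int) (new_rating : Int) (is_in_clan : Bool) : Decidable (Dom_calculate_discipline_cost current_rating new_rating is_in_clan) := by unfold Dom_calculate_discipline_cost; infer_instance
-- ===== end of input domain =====

-- B replaces A's per-dot loop by a closed-form arithmetic-series formula (plus a +10 term when the range covers the first dot).

-- ===== PORT A =====
def calculate_discipline_cost (current_rating : Int) (new_rating : Int) (is_in_clan : Bool) : Int :=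
  (PySem.List.pyRange (current_rating + 1) (new_rating + 1) 1).foldl
    (fun total_cost rating =>
      if rating == 1 then total_cost + 10
      else if is_in_clan then total_cost + (rating - 1) * 5
      else total_cost + (rating - 1) * 7) 0

-- ===== PORT B =====
def calculate_discipline_cost_alt (current_rating : Int) (new_rating : Int) (is_in_clan : Bool) : Int :=
  if new_rating ≤ current_rating then 0
  else
    let mult : Int := if is_in_clan then 5 else 7
    let series : Int :=
      PySem.Int.floordiv ((new_rating - current_rating) * (current_rating + new_rating - 1)) 2
    let first_dot : Int := if current_rating < 1 ∧ 1 ≤ new_rating then 10 else 0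
    series * mult + first_dot

-- ===== PRECONDITION & SPEC =====
def Spec_calculate_discipline_cost (current_rating : Int) (new_rating : Int) (is_in_clan : Bool) (out : Int) : Prop := out = calculate_discipline_cost_alt current_rating new_rating is_in_clan
instance (current_rating : Int) (new_rating : Int) (is_in_clan : Bool) (out : Int) : Decidable (Spec_calculate_discipline_cost current_rating new_rating is_in_clan out) := by unfold Spec_calculate_discipline_cost; infer_instance

-- ===== CLAIM (what is proved, stated in full; the proofs are below) =====
def Claim_equal_calculate_discipline_cost : Prop := ∀ (current_rating : Int) (new_rating : Int) (is_in_clan : Bool), Dom_calculate_discipline_cost current_rating new_rating is_in_clan → Spec_calculate_discipline_cost current_rating new_rating is_in_clan (calculate_discipline_cost current_rating new_rating is_in_clan)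

-- ===== LEMMAS AND PROOFS =====

-- the per-dot cost A adds for one step, with multiplier m
def pvStep (m r : Int) : Int := if r == 1 then 10 else (r - 1) * m

-- the closed form B computes, with Lean's ediv (= floordiv for positive divisor)
def pvClosed (m c n : Int) : Int :=
  if n ≤ c then 0
  else ((n - c) * (c + n - 1)) / 2 * m + (if c < 1 ∧ 1 ≤ n then 10 else 0)

lemma pvSum_closed (m : Int) : ∀ (k : Nat) (c n : Int), (n - c).toNat = k →
    ((PySem.List.pyRange (c + 1) (n + 1) 1).map (pvStep m)).sum = pvClosed m c n := by
  intro k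
  induction k with
  | zero =>
    intro c n hk
    have hle : n ≤ c := by omega
    rw [PySem.List.pyRange_one_eq_nil (by omega)]
    simp [pvClosed, hle]
  | succ k ih =>
    intro c n hk
    have hlt : c < n := by omega
    rw [PySem.List.pyRange_one_cons (by omega)]
    rw [List.map_cons, List.sum_cons, ih (c + 1) n (by omega)]
    unfold pvClosed pvStep
    rw [if_neg (show ¬ n ≤ c by omega)]
    by_cases h1 : n ≤ c + 1
    · -- single-step range: n = c + 1
      rw [if_pos h1]
      have hn1 : n = c + 1 := by omega
      subst hn1
      have h2 : (c + 1 - c) * (c + (c + 1) - 1) = 2 * c := by ring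
      rw [h2, Int.mul_ediv_cancel_left c two_ne_zero]
      by_cases hc : c = 0
      · subst hc; norm_num
      · rw [if_neg (show ¬ ((c + 1 == 1) = true) by simp only [beq_iff_eq]; omega),
            if_neg (show ¬ (c < 1 ∧ 1 ≤ c + 1) by omega)]
        ring
    · rw [if_neg h1]
      obtain ⟨q, hq⟩ : (2:Int) ∣ (n - c) * (c + n - 1) := by
        rcases Int.even_or_odd (n - c) with h | h
        · exact Dvd.dvd.mul_right h.two_dvd _
        · refine Dvd.dvd.mul_left ?_ _
          rcases h with ⟨j, hj⟩
          exact ⟨c + j, by omega⟩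
      obtain ⟨q', hq'⟩ : (2:Int) ∣ (n - (c + 1)) * (c + 1 + n - 1) := by
        rcases Int.even_or_odd (n - (c + 1)) with h | h
        · exact Dvd.dvd.mul_right h.two_dvd _
        · refine Dvd.dvd.mul_left ?_ _
          rcases h with ⟨j, hj⟩
          exact ⟨c + 1 + j, by omega⟩
      have hdq : (n - c) * (c + n - 1) / 2 = q := by
        rw [hq]; exact Int.mul_ediv_cancel_left q two_ne_zero
      have hdq' : (n - (c + 1)) * (c + 1 + n - 1) / 2 = q' := by
        rw [hq']; exact Int.mul_ediv_cancel_left q' two_ne_zero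
      have hpoly : (n - c) * (c + n - 1) = (n - (c + 1)) * (c + 1 + n - 1) + 2 * c := by ring
      have hqq : q = q' + c := by omega
      rw [hdq, hdq', hqq]
      by_cases hc : c = 0
      · subst hc
        rw [if_pos (show ((0:Int) + 1 == 1) = true by norm_num),
            if_neg (show ¬ ((0:Int) + 1 < 1 ∧ 1 ≤ n) by omega),
            if_pos (show (0:Int) < 1 ∧ 1 ≤ n by omega)]
        ring
      · rw [if_neg (show ¬ ((c + 1 == 1) = true) by simp only [beq_iff_eq]; omega)]
        have hI : (if c + 1 < 1 ∧ 1 ≤ n then (10:Int) else 0)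
            = (if c < 1 ∧ 1 ≤ n then 10 else 0) := by
          split_ifs <;> omega
        rw [hI]
        ring

-- A's fold equals the sum of pvStep over the range (with m fixed by is_in_clan)
lemma pvFold_eq_sum (m c n : Int) :
    (PySem.List.pyRange (c + 1) (n + 1) 1).foldl
      (fun t r => if r == 1 then t + 10 else t + (r - 1) * m) 0
    = ((PySem.List.pyRange (c + 1) (n + 1) 1).map (pvStep m)).sum := by
  have h := PySem.List.foldl_add (l := PySem.List.pyRange (c + 1) (n + 1) 1)
    (g := pvStep m) (a := 0)
  have hf : (fun (t r : Int) => if r == 1 then t + 10 else t + (r - 1) * m)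
      = fun t r => t + pvStep m r := by
    funext t r; unfold pvStep; split <;> rfl
  rw [hf]
  simpa using h

-- ===== VERDICT (by name: the statement is the Claim_ definition above) =====
theorem calculate_discipline_cost_spec : Claim_equal_calculate_discipline_cost := by
  intro c n b _
  unfold Spec_calculate_discipline_cost calculate_discipline_cost calculate_discipline_cost_alt
  have key : ∀ m : Int,
      (PySem.List.pyRange (c + 1) (n + 1) 1).foldl
        (fun t r => if r == 1 then t + 10 else t + (r - 1) * m) 0 = pvClosed m c n := by
    intro m
    rw [pvFold_eq_sum, pvSum_closed m (n - c).toNat c n rfl]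
  rw [PySem.Int.floordiv_eq_ediv_of_pos (by norm_num)]
  cases b with
  | true =>
    rw [show (fun (total_cost rating : Int) => if rating == 1 then total_cost + 10
        else if (true : Bool) then total_cost + (rating - 1) * 5 else total_cost + (rating - 1) * 7)
      = fun t r => if r == 1 then t + 10 else t + (r - 1) * 5 by funext t r; simp]
    rw [key 5]
    simp [pvClosed]
  | false =>
    rw [show (fun (total_cost rating : Int) => if rating == 1 then total_cost + 10
        else if (false : Bool) then total_cost + (rating - 1) * 5 else total_cost + (rating - 1) * 7)
      = fun t r => if r == 1 then t + 10 else t + (r - 1) * 7 by funext t r; simp]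
    rw [key 7]
    simp [pvClosed]
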